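-- pv_equiv track=rewrite | github.com/dragosolomon/LFA | dfa.py | simulate_automata
-- ===== SOURCE A (Python) =====
-- import copy
--
-- def simulate_automata(word, states, alphabet, initial_state, final_states, transitions):
--     current_paths = [[initial_state]]
--     for symbol in word:
--         next_paths = []
--         for path in current_paths:
--             current_state = path[-1]
--             if (current_state, symbol) in transitions:
--                 for next_state in transitions[(current_state, symbol)]:
--                     next_path = copy.deepcopy(path)
--                     next_path.append(next_state)
--                     next_paths.append(next_path)
--         current_paths = next_paths
--     accepted_paths = [path for path in current_paths if path[-1] in final_states]
--     return bool(accepted_paths), accepted_paths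
-- ===== SOURCE B (Python) =====
-- def simulate_automata(word, states, alphabet, initial_state, final_states, transitions):
--     # Depth-first search with an explicit stack, instead of A's layered
--     # breadth-first frontier; DFS visitation order reproduces A's path order.
--     results = []
--     stack = [(initial_state, word, [initial_state])]
--     while stack:
--         state, rest, path = stack.pop()
--         if not rest:
--             if state in final_states:
--                 results.append(path)
--         else:
--             for next_state in reversed(transitions.get((state, rest[0]), [])):
--                 stack.append((next_state, rest[1:], path + [next_state]))
--     return bool(results), results
-- ===== Notes on version B (the rewrite author's own statement) =====
-- stated objective: alternative
-- what changed: Replaced A's layered BFS (rebuilding the whole frontier of paths for each symbol, with a deepcopy per extension) by an explicit-stack depth-first search that emits each accepted path as soon as it is completed.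
import Mathlib
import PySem

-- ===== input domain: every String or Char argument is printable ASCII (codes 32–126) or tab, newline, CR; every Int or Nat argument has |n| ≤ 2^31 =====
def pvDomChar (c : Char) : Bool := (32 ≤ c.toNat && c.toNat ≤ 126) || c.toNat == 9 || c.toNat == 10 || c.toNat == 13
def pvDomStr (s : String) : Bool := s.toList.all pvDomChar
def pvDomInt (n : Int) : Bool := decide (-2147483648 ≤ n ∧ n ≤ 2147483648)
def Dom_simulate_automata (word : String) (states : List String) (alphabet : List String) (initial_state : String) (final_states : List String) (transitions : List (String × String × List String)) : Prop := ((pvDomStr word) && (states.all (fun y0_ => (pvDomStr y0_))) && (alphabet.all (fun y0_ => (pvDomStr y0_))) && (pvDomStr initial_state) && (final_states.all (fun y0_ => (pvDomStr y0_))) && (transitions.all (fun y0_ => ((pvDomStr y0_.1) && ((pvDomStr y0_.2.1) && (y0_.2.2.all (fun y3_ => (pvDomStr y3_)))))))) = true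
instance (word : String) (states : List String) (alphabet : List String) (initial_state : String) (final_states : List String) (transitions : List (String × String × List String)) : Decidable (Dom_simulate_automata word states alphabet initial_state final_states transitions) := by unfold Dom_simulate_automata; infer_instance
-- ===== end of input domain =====

-- B replaces A's layered BFS frontier (one deepcopied path list per symbol) by an
-- explicit-stack depth-first search that emits each accepted path when it is completed;
-- DFS visitation order reproduces A's path order exactly (objective: alternative).

-- shared primitive: Python's dict lookup transitions[(state, symbol)] on the association list (first match)
def lookupTrans (transitions : List (String × String × List String)) (s c : String) : Option (List String) :=
  (transitions.find? (fun t => t.1 == s && t.2.1 == c)).map (fun t => t.2.2)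

-- ===== PORT A =====
def simulate_automata (word : String) (states : List String) (alphabet : List String) (initial_state : String) (final_states : List String) (transitions : List (String × String × List String)) : Bool × List (List String) :=
  let current_paths : List (List String) := [[initial_state]]
  let current_paths := word.toList.foldl (fun current_paths symbol =>
    -- 'next_paths = []' then the two nested for-loops appending to it
    current_paths.foldl (fun next_paths path =>
      let current_state := (PySem.List.pyGet? path (-1)).getD ""   -- path[-1]; A's paths are never empty
      match lookupTrans transitions current_state (String.singleton symbol) with
      | some ns => ns.foldl (fun next_paths next_state => next_paths ++ [path ++ [next_state]]) next_paths
      | none => next_paths) []) current_paths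
  let accepted_paths := current_paths.filter (fun path => final_states.contains ((PySem.List.pyGet? path (-1)).getD ""))
  (!accepted_paths.isEmpty, accepted_paths)

-- ===== PORT B =====
-- bound used only for termination of the stack loop
def pvWeight (transitions : List (String × String × List String)) : Nat :=
  (transitions.map (fun t => t.2.2.length)).sum

theorem lookupTrans_length_le (transitions : List (String × String × List String)) (s c : String) (l : List String) (h : lookupTrans transitions s c = some l) : l.length ≤ pvWeight transitions := by
  unfold lookupTrans at h
  rcases Option.map_eq_some_iff.mp h with ⟨t, ht, rfl⟩
  have hm : t ∈ transitions := List.mem_of_find?_eq_some ht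
  have : t.2.2.length ∈ transitions.map (fun t => t.2.2.length) := List.mem_map_of_mem hm
  exact List.le_sum_of_mem this

-- sum of the termination weights of a block of freshly pushed stack entries
theorem pushedWeight_sum (ns : List String) (cs : List Char) (path : List String) (K : Nat) :
    ((ns.map (fun n => (n, cs, path ++ [n]))).map (fun e : String × List Char × List String => K ^ e.2.1.length)).sum
      = ns.length * K ^ cs.length := by
  induction ns with
  | nil => simp
  | cons a ns ih =>
      simp only [List.map_cons, List.sum_cons, List.length_cons, ih]
      ring

-- the while-loop of B: stack top at the head; 'for ns in reversed(...): stack.append(...)'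
-- pushes the successors so that they are popped in transition-list order, i.e. prepends them in order
def altLoop (final_states : List String) (transitions : List (String × String × List String)) (results : List (List String)) (stack : List (String × List Char × List String)) : List (List String) :=
  match stack with
  | [] => results
  | (state, rest, path) :: stk =>
    match rest with
    | [] =>
        altLoop final_states transitions
          (if final_states.contains state then results ++ [path] else results) stk
    | c :: cs =>
        altLoop final_states transitions results
          ((((lookupTrans transitions state (String.singleton c)).getD []).map (fun n => (n, cs, path ++ [n]))) ++ stk)
termination_by (stack.map (fun e => (pvWeight transitions + 1) ^ e.2.1.length)).sum
decreasing_by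
  · simp
  · have hns : ((lookupTrans transitions state (String.singleton c)).getD []).length ≤ pvWeight transitions := by
      cases h : lookupTrans transitions state (String.singleton c) with
      | none => simp
      | some l => simpa using lookupTrans_length_le transitions state (String.singleton c) l h
    set ns := (lookupTrans transitions state (String.singleton c)).getD []
    simp only [List.map_cons, List.sum_cons, List.map_append, List.sum_append,
      pushedWeight_sum, List.length_cons, pow_succ]
    have h2 : ns.length * (pvWeight transitions + 1) ^ cs.length
        < (pvWeight transitions + 1) ^ cs.length * (pvWeight transitions + 1) := by
      have hK : 1 ≤ (pvWeight transitions + 1) ^ cs.length := Nat.one_le_pow _ _ (by omega)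
      calc ns.length * (pvWeight transitions + 1) ^ cs.length
          ≤ pvWeight transitions * (pvWeight transitions + 1) ^ cs.length :=
            Nat.mul_le_mul_right _ hns
        _ < (pvWeight transitions + 1) ^ cs.length * (pvWeight transitions + 1) := by nlinarith
    omega

def simulate_automata_alt (word : String) (states : List String) (alphabet : List String) (initial_state : String) (final_states : List String) (transitions : List (String × String × List String)) : Bool × List (List String) :=
  let results := altLoop final_states transitions [] [(initial_state, word.toList, [initial_state])]
  (!results.isEmpty, results)

-- ===== PRECONDITION & SPEC =====
def Spec_simulate_automata (word : String) (states : List String) (alphabet : List String) (initial_state : String) (final_states : List String) (transitions : List (String × String × List String)) (out : Bool × List (List String)) : Prop := out = simulate_automata_alt word states alphabet initial_state final_states transitions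
instance (word : String) (states : List String) (alphabet : List String) (initial_state : String) (final_states : List String) (transitions : List (String × String × List String)) (out : Bool × List (List String)) : Decidable (Spec_simulate_automata word states alphabet initial_state final_states transitions out) := by unfold Spec_simulate_automata; infer_instance

-- ===== CLAIM (what is proved, stated in full; the proofs are below) =====
def Claim_equal_simulate_automata : Prop := ∀ (word : String) (states : List String) (alphabet : List String) (initial_state : String) (final_states : List String) (transitions : List (String × String × List String)), Dom_simulate_automata word states alphabet initial_state final_states transitions → Spec_simulate_automata word states alphabet initial_state final_states transitions (simulate_automata word states alphabet initial_state final_states transitions)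

-- ===== LEMMAS AND PROOFS =====

-- python path[-1] of a nonempty path, with the total default A's port uses
def lastD (path : List String) : String := (PySem.List.pyGet? path (-1)).getD ""

-- specification of B's DFS: all accepted paths continuing from `state` (last of `path`) with `rest` to read
def dfsSpec (final_states : List String) (transitions : List (String × String × List String)) : List Char → String → List String → List (List String)
  | [], state, path => if final_states.contains state then [path] else []
  | c :: cs, state, path =>
      ((lookupTrans transitions state (String.singleton c)).getD []).flatMap
        (fun n => dfsSpec final_states transitions cs n (path ++ [n]))

theorem lastD_append (path : List String) (n : String) : lastD (path ++ [n]) = n := by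
  simp [lastD, PySem.List.pyGet?_neg_one_append_singleton]

theorem altLoop_eq (final_states : List String) (transitions : List (String × String × List String)) (results : List (List String)) (stack : List (String × List Char × List String)) :
    altLoop final_states transitions results stack
      = results ++ stack.flatMap (fun e => dfsSpec final_states transitions e.2.1 e.1 e.2.2) := by
  fun_induction altLoop final_states transitions results stack with
  | case1 => simp
  | case2 results state path stk ih =>
      simp only [dite_eq_ite] at ih
      rw [ih]; simp only [List.flatMap_cons, dfsSpec]
      split <;> simp
  | case3 results state c cs path stk ih =>
      rw [ih]
      simp only [List.flatMap_cons, List.flatMap_append, List.flatMap_map, dfsSpec]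

-- A's inner per-symbol loop is a flatMap over the current paths
theorem stepA_eq (transitions : List (String × String × List String)) (symbol : Char) (paths : List (List String)) (acc : List (List String)) :
    paths.foldl (fun next_paths path =>
        match lookupTrans transitions (lastD path) (String.singleton symbol) with
        | some ns => ns.foldl (fun next_paths next_state => next_paths ++ [path ++ [next_state]]) next_paths
        | none => next_paths) acc
      = acc ++ paths.flatMap (fun path =>
          ((lookupTrans transitions (lastD path) (String.singleton symbol)).getD []).map (fun n => path ++ [n])) := by
  have hbody : (fun next_paths path =>
        match lookupTrans transitions (lastD path) (String.singleton symbol) with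
        | some ns => ns.foldl (fun next_paths next_state => next_paths ++ [path ++ [next_state]]) next_paths
        | none => next_paths)
      = fun (next_paths : List (List String)) path => next_paths ++
          ((lookupTrans transitions (lastD path) (String.singleton symbol)).getD []).map (fun n => path ++ [n]) := by
    funext next_paths path
    cases h : lookupTrans transitions (lastD path) (String.singleton symbol) with
    | none => simp
    | some ns =>
        simp only [Option.getD_some]
        exact PySem.List.foldl_append_singleton_eq_map ..
  rw [hbody, PySem.List.foldl_append_eq_flatMap]

theorem filter_eq_flatMap_ite {α : Type} (l : List α) (p : α → Bool) :
    l.filter p = l.flatMap (fun a => if p a then [a] else []) := by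
  induction l with
  | nil => rfl
  | cons a l ih => simp [List.filter_cons, List.flatMap_cons, ih]; split <;> simp

-- BFS layer fold then final filter = per-path DFS results, for any frontier of paths
theorem bfs_eq_dfs (final_states : List String) (transitions : List (String × String × List String)) :
    ∀ (cs : List Char) (paths : List (List String)),
    (cs.foldl (fun current_paths symbol =>
        current_paths.foldl (fun next_paths path =>
          match lookupTrans transitions (lastD path) (String.singleton symbol) with
          | some ns => ns.foldl (fun next_paths next_state => next_paths ++ [path ++ [next_state]]) next_paths
          | none => next_paths) []) paths).filter (fun path => final_states.contains (lastD path))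
      = paths.flatMap (fun p => dfsSpec final_states transitions cs (lastD p) p) := by
  intro cs
  induction cs with
  | nil =>
      intro paths
      simpa [dfsSpec] using filter_eq_flatMap_ite paths (fun path => final_states.contains (lastD path))
  | cons c cs ih =>
      intro paths
      rw [List.foldl_cons, ih, stepA_eq]
      simp only [List.nil_append, List.flatMap_assoc, List.flatMap_map]
      apply List.flatMap_congr ?_
      intro p _
      simp [dfsSpec, lastD_append]

-- ===== VERDICT (by name: the statement is the Claim_ definition above) =====
theorem simulate_automata_spec : Claim_equal_simulate_automata := by
  intro word states alphabet initial_state final_states transitions _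
  unfold Spec_simulate_automata simulate_automata simulate_automata_alt
  have h := bfs_eq_dfs final_states transitions word.toList [[initial_state]]
  have hlast : lastD [initial_state] = initial_state := lastD_append [] initial_state
  simp only [List.flatMap_cons, List.flatMap_nil, List.append_nil] at h
  rw [hlast] at h
  simp only [lastD] at h
  rw [altLoop_eq]
  simp only [List.flatMap_cons, List.flatMap_nil, List.append_nil, List.nil_append]
  rw [h]
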